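-- pv_equiv track=rewrite | github.com/LiNTe912/Dynamic-sample-GRPO | verl/verl/utils/reward_score/ds.py | sortQA
-- ===== SOURCE A (Python) =====
-- from collections import defaultdict
--
-- def sortQA(questions, answers):
--     # 1. 配对：打包成 (question, answer, original_index) 三元组
--     paired = list(zip(questions, answers, range(len(questions))))
--
--     # 2. 分组：将相同的问题聚到一起
--     grouped = defaultdict(list)
--     for q, a, idx in paired:
--         grouped[q].append((q, a, idx))  # 保留原顺序
--
--     # 3. 排序：将每组拼接回来
--     sorted_triplets = []
--     for q in sorted(grouped.keys()):
--         sorted_triplets.extend(grouped[q])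
--
--     # 4. 解包为三个列表：问题、答案、新→原的映射
--     sorted_questions, sorted_answers, original_indices = zip(*sorted_triplets)
--     sorted_questions = list(sorted_questions)
--     sorted_answers = list(sorted_answers)
--     original_indices = list(original_indices)  # 这是映射：sorted -> original
--
--     return sorted_questions, sorted_answers, original_indices
-- ===== SOURCE B (Python) =====
-- def sortQA(questions, answers):
--     n = min(len(questions), len(answers))
--     order = sorted(range(n), key=lambda i: questions[i])
--     return ([questions[i] for i in order],
--             [answers[i] for i in order],
--             order)
-- ===== Notes on version B (the rewrite author's own statement) =====
-- stated objective: simpler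
-- what changed: Replaces the defaultdict grouping plus sort-of-keys-and-concatenate pass over (q,a,idx) triples with an argsort: stably sort the index list by question and build the three output lists by indexing; no triples, no dict.
import Mathlib
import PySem

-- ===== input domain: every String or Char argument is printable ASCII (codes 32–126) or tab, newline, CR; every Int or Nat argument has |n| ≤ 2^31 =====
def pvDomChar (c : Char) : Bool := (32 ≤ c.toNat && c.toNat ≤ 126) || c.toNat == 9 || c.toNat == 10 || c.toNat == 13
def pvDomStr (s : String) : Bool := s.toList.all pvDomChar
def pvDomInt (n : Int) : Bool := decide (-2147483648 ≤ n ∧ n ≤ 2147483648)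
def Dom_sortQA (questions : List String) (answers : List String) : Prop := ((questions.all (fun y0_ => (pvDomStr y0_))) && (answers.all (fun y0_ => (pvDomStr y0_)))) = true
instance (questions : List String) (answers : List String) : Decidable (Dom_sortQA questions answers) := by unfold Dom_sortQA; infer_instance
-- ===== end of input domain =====

-- B replaces A's triple-building, defaultdict grouping and sorted-keys concatenation by an argsort:
-- stably sort the index list by question, then build the outputs by indexing (simpler; same cost).
-- A mutates nothing; the claim is about the return value.

-- ===== PORT A =====
def sortQA (questions : List String) (answers : List String) : List String × List String × List Int :=
  -- paired = list(zip(questions, answers, range(len(questions))))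
  let paired : List (String × String × Int) :=
    questions.zip (answers.zip (PySem.List.pyRange 0 (questions.length : Int) 1))
  -- grouped = defaultdict(list); for q, a, idx in paired: grouped[q].append((q, a, idx))
  let grouped : PySem.Dict String (List (String × String × Int)) :=
    paired.foldl (fun d t => d.modify t.1 [] (fun g => g ++ [t])) PySem.Dict.empty
  -- sorted_triplets = []; for q in sorted(grouped.keys()): sorted_triplets.extend(grouped[q])
  let sorted_triplets : List (String × String × Int) :=
    (PySem.List.sorted grouped.keys (fun q => q)).foldl (fun acc q => acc ++ grouped.getD q []) []
  -- sorted_questions, sorted_answers, original_indices = zip(*sorted_triplets)  -- ValueError when empty: excluded by Pre_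
  (sorted_triplets.map (fun t => t.1), sorted_triplets.map (fun t => t.2.1), sorted_triplets.map (fun t => t.2.2))

-- ===== PORT B =====
def sortQA_alt (questions : List String) (answers : List String) : List String × List String × List Int :=
  -- n = min(len(questions), len(answers))
  let n : Int := min (questions.length : Int) (answers.length : Int)
  -- order = sorted(range(n), key=lambda i: questions[i])   -- every i is in range, so pyGetD's default is never used: exact
  let order : List Int :=
    PySem.List.sorted (PySem.List.pyRange 0 n 1) (fun i => PySem.List.pyGetD questions i "")
  -- ([questions[i] for i in order], [answers[i] for i in order], order)
  (order.map (fun i => PySem.List.pyGetD questions i ""),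
   order.map (fun i => PySem.List.pyGetD answers i ""),
   order)

-- ===== PRECONDITION & SPEC =====
-- Pre_ excludes exactly the inputs where 'zip(*sorted_triplets)' unpacks an empty iterable and the Python A raises
-- ValueError (either input list empty).
def Pre_sortQA (questions : List String) (answers : List String) : Prop :=
  questions ≠ [] ∧ answers ≠ []
instance (questions : List String) (answers : List String) : Decidable (Pre_sortQA questions answers) := by unfold Pre_sortQA; infer_instance
def pvWitness_sortQA : List String × List String := (["b", "a"], ["x", "y"])

def Spec_sortQA (questions : List String) (answers : List String) (out : List String × List String × List Int) : Prop := out = sortQA_alt questions answers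
instance (questions : List String) (answers : List String) (out : List String × List String × List Int) : Decidable (Spec_sortQA questions answers out) := by unfold Spec_sortQA; infer_instance

-- ===== CLAIM (what is proved, stated in full; the proofs are below) =====
def Claim_equal_sortQA : Prop := ∀ (questions : List String) (answers : List String), Dom_sortQA questions answers → Pre_sortQA questions answers → Spec_sortQA questions answers (sortQA questions answers)

-- ===== LEMMAS AND PROOFS =====

-- insertBy drops x exactly at the boundary between the ≤-part and the >-part.
theorem insertBy_middle {α : Type} (ble : α → α → Bool) (x : α) (u v : List α)
    (hu : ∀ y ∈ u, ble x y = false) (hv : ∀ y ∈ v, ble x y = true) :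
    PySem.List.insertBy ble x (u ++ v) = u ++ x :: v := by
  induction u with
  | nil =>
    cases v with
    | nil => simp [PySem.List.insertBy]
    | cons y ys => simp [PySem.List.insertBy, hv y (by simp)]
  | cons y ys ih =>
    simp only [List.cons_append, PySem.List.insertBy, hu y (by simp)]
    simp [ih (fun z hz => hu z (by simp [hz]))]

-- A strictly increasing list splits at x into its ≤-part followed by its >-part.
theorem pairwise_lt_split {κ : Type} [LinearOrder κ] (x : κ) (ks : List κ)
    (h : ks.Pairwise (· < ·)) :
    ks = ks.filter (fun q => decide (q ≤ x)) ++ ks.filter (fun q => decide (x < q)) := by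
  induction ks with
  | nil => simp
  | cons k rest ih =>
    rcases List.pairwise_cons.mp h with ⟨hk, hrest⟩
    by_cases hkx : k ≤ x
    · simp only [List.filter_cons, decide_eq_true_eq]
      rw [if_pos (by simpa using hkx), if_neg (by simpa using not_lt.mpr hkx)]
      simpa using ih hrest
    · rw [not_le] at hkx
      have hall : ∀ y ∈ (k :: rest), x < y := by
        intro y hy
        rcases List.mem_cons.mp hy with rfl | hy
        · exact hkx
        · exact hkx.trans (hk y hy)
      have h1 : (k :: rest).filter (fun q => decide (q ≤ x)) = [] := by
        apply List.filter_eq_nil_iff.mpr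
        intro y hy
        simpa using not_le.mpr (hall y hy)
      have h2 : (k :: rest).filter (fun q => decide (x < q)) = (k :: rest) := by
        apply List.filter_eq_self.mpr
        intro y hy
        simpa using hall y hy
      rw [h1, h2, List.nil_append]

-- If z ∈ qs, qs strictly increasing and all ≤ z, then extending z's group by [t] appends t at the very end.
theorem flatMap_last_group {κ α : Type} [LinearOrder κ] [BEq κ] [LawfulBEq κ]
    (z : κ) (t : α) (g : κ → List α) (qs : List κ)
    (hp : qs.Pairwise (· < ·)) (hle : ∀ q ∈ qs, q ≤ z) (hz : z ∈ qs) :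
    qs.flatMap (fun q => g q ++ if z == q then [t] else []) = qs.flatMap g ++ [t] := by
  induction qs with
  | nil => cases hz
  | cons k rest ih =>
    rcases List.pairwise_cons.mp hp with ⟨hk, hrest⟩
    by_cases hzk : z = k
    · subst hzk
      have hrestnil : rest = [] := by
        cases rest with
        | nil => rfl
        | cons r rs =>
          have h1 : z < r := hk r (by simp)
          have h2 : r ≤ z := hle r (by simp)
          exact absurd h1 (not_lt.mpr h2)
      simp [hrestnil]
    · have hzrest : z ∈ rest := by
        rcases List.mem_cons.mp hz with rfl | h
        · exact absurd rfl hzk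
        · exact h
      have : (z == k) = false := by simpa using hzk
      simp only [List.flatMap_cons, this]
      rw [ih hrest (fun q hq => hle q (by simp [hq])) hzrest]
      simp

-- MAIN LEMMA (A-side): concatenating, over the sorted distinct keys, the in-order groups of l
-- is exactly the stable sort of l by key.
theorem stable_group_sort {κ α : Type} [LinearOrder κ] [BEq κ] [LawfulBEq κ]
    (l : List α) (key : α → κ) :
    (PySem.List.sorted (PySem.Set.ofList (l.map key)) (fun q => q)).flatMap
        (fun q => l.filter (fun t => key t == q))
      = PySem.List.sorted l key := by
  induction l using List.reverseRecOn with
  | nil => simp [PySem.List.sorted]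
  | append_singleton m t ih =>
    set S : PySem.Set κ := PySem.Set.ofList (m.map key) with hS
    set ks : List κ := PySem.List.sorted S (fun q => q) with hks
    have hkp : ks.Pairwise (· < ·) := PySem.List.sorted_ofList_pairwise_lt _
    set g : κ → List α := fun q => m.filter (fun t => key t == q) with hg
    set ks₁ : List κ := ks.filter (fun q => decide (q ≤ key t)) with hks₁
    set ks₂ : List κ := ks.filter (fun q => decide (key t < q)) with hks₂
    have hsplit : ks = ks₁ ++ ks₂ := pairwise_lt_split (key t) ks hkp
    have hks₁mem : ∀ q ∈ ks₁, q ≤ key t := by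
      intro q hq; simpa using (List.of_mem_filter hq)
    have hks₂mem : ∀ q ∈ ks₂, key t < q := by
      intro q hq; simpa using (List.of_mem_filter hq)
    have hrhs : PySem.List.sorted (m ++ [t]) key
        = PySem.List.insertBy (fun a b => decide (key a < key b)) t (PySem.List.sorted m key) := by
      rw [PySem.List.sorted_eq_foldl_insertBy, PySem.List.sorted_eq_foldl_insertBy, List.foldl_append]
      rfl
    have hUle : ∀ y ∈ ks₁.flatMap g, ¬ key t < key y := by
      intro y hy
      rcases List.mem_flatMap.mp hy with ⟨q, hq, hyq⟩
      have : key y = q := by simpa using (List.of_mem_filter hyq)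
      rw [not_lt, this]; exact hks₁mem q hq
    have hVgt : ∀ y ∈ ks₂.flatMap g, key t < key y := by
      intro y hy
      rcases List.mem_flatMap.mp hy with ⟨q, hq, hyq⟩
      have : key y = q := by simpa using (List.of_mem_filter hyq)
      rw [this]; exact hks₂mem q hq
    have hins : PySem.List.insertBy (fun a b => decide (key a < key b)) t (PySem.List.sorted m key)
        = ks₁.flatMap g ++ t :: ks₂.flatMap g := by
      rw [← ih, hsplit, List.flatMap_append]
      exact insertBy_middle _ t _ _
        (fun y hy => by simpa using hUle y hy)
        (fun y hy => by simpa using hVgt y hy)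
    have hgrp : ∀ q, (m ++ [t]).filter (fun t' => key t' == q)
        = g q ++ if key t == q then [t] else [] := by
      intro q
      rw [List.filter_append]
      simp [hg, List.filter_singleton]
    rw [hrhs, hins]
    rw [List.map_append, List.map_singleton, PySem.Set.ofList_append_singleton, ← hS]
    by_cases hmem : key t ∈ S
    · rw [PySem.Set.add_of_mem hmem, ← hks]
      have hmemks : key t ∈ ks := by
        rw [hks]; rw [PySem.List.mem_sorted]; exact hmem
      have hmemks₁ : key t ∈ ks₁ := by
        rw [hks₁]; exact List.mem_filter.mpr ⟨hmemks, by simp⟩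
      calc ks.flatMap (fun q => (m ++ [t]).filter (fun t' => key t' == q))
          = ks.flatMap (fun q => g q ++ if key t == q then [t] else []) := by
            exact List.flatMap_congr (fun q _ => hgrp q)
        _ = ks₁.flatMap (fun q => g q ++ if key t == q then [t] else [])
            ++ ks₂.flatMap (fun q => g q ++ if key t == q then [t] else []) := by
            rw [hsplit, List.flatMap_append]
        _ = (ks₁.flatMap g ++ [t]) ++ ks₂.flatMap g := by
            congr 1
            · exact flatMap_last_group (key t) t g ks₁
                (List.Pairwise.filter _ hkp) hks₁mem hmemks₁
            · apply List.flatMap_congr; intro q hq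
              have : (key t == q) = false := by
                simpa using (ne_of_lt (hks₂mem q hq))
              simp [this]
        _ = ks₁.flatMap g ++ t :: ks₂.flatMap g := by simp
    · rw [PySem.Set.add_of_not_mem hmem]
      have hstrict : ∀ q ∈ ks₁, q < key t := by
        intro q hq
        have hqks : q ∈ ks := by rw [hsplit]; exact List.mem_append_left _ hq
        have hqS : q ∈ S := (PySem.List.mem_sorted _ _ _ _).mp hqks
        have hne : q ≠ key t := fun h => hmem (h ▸ hqS)
        exact lt_of_le_of_ne (hks₁mem q hq) hne
      have hksperm : (ks₁ ++ ks₂).Perm S := by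
        rw [← hsplit]; exact PySem.List.sorted_perm S (fun q => q) false
      have hperm : (ks₁ ++ key t :: ks₂).Perm (S ++ [key t]) := by
        refine List.perm_middle.trans ?_
        exact (hksperm.cons (key t)).trans (List.perm_append_singleton (key t) S).symm
      have hpw : (ks₁ ++ key t :: ks₂).Pairwise (· < ·) := by
        have h0 := hsplit ▸ hkp
        rcases List.pairwise_append.mp h0 with ⟨p₁, p₂, hcross⟩
        refine List.pairwise_append.mpr ⟨p₁, List.pairwise_cons.mpr ⟨hks₂mem, p₂⟩, ?_⟩
        intro a ha b hb
        rcases List.mem_cons.mp hb with rfl | hb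
        · exact hstrict a ha
        · exact hcross a ha b hb
      have hkeys' : PySem.List.sorted (S ++ [key t]) (fun q => q) = ks₁ ++ key t :: ks₂ :=
        PySem.List.sorted_eq_of_perm_of_pairwise_lt _ _ _ hperm hpw
      have hgt : g (key t) = [] := by
        rw [hg]
        apply List.filter_eq_nil_iff.mpr
        intro x hx hxx
        apply hmem
        rw [hS, PySem.Set.mem_ofList]
        exact (eq_of_beq hxx) ▸ List.mem_map_of_mem hx
      rw [hkeys']
      calc (ks₁ ++ key t :: ks₂).flatMap (fun q => (m ++ [t]).filter (fun t' => key t' == q))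
          = (ks₁ ++ key t :: ks₂).flatMap (fun q => g q ++ if key t == q then [t] else []) :=
            List.flatMap_congr (fun q _ => hgrp q)
        _ = ks₁.flatMap (fun q => g q ++ if key t == q then [t] else [])
            ++ ((g (key t) ++ [t]) ++ ks₂.flatMap (fun q => g q ++ if key t == q then [t] else [])) := by
            rw [List.flatMap_append, List.flatMap_cons]; simp
        _ = ks₁.flatMap g ++ t :: ks₂.flatMap g := by
            rw [hgt]
            have e₁ : ks₁.flatMap (fun q => g q ++ if key t == q then [t] else []) = ks₁.flatMap g := by
              apply List.flatMap_congr
              intro q hq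
              have : (key t == q) = false := by
                simpa using ne_of_gt (hstrict q hq)
              simp [this]
            have e₂ : ks₂.flatMap (fun q => g q ++ if key t == q then [t] else []) = ks₂.flatMap g := by
              apply List.flatMap_congr
              intro q hq
              have : (key t == q) = false := by
                simpa using (ne_of_lt (hks₂mem q hq))
              simp [this]
            rw [e₁, e₂]; simp

-- B-side: insertBy only looks at the key, so it commutes with decorating by f.
theorem insertBy_map_key {α β κ : Type} [LinearOrder κ] (f : α → β) (key : β → κ) (x : α) (m : List α) :
    PySem.List.insertBy (fun a b => decide (key a < key b)) (f x) (m.map f)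
      = (PySem.List.insertBy (fun a b => decide (key (f a) < key (f b))) x m).map f := by
  induction m with
  | nil => simp [PySem.List.insertBy]
  | cons y ys ih =>
    simp only [List.map_cons, PySem.List.insertBy]
    by_cases h : key (f x) < key (f y)
    · simp [h]
    · simp [h, ih]

-- B-side: stable sort commutes with a decorating map when the key factors through it.
theorem sorted_map_key {α β κ : Type} [LinearOrder κ] (f : α → β) (key : β → κ) (l : List α) :
    PySem.List.sorted (l.map f) key = (PySem.List.sorted l (fun a => key (f a))).map f := by
  rw [PySem.List.sorted_eq_foldl_insertBy, PySem.List.sorted_eq_foldl_insertBy, List.foldl_map]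
  suffices h : ∀ acc : List α,
      l.foldl (fun acc x => PySem.List.insertBy (fun a b => decide (key a < key b)) (f x) acc) (acc.map f)
        = (l.foldl (fun acc x => PySem.List.insertBy (fun a b => decide (key (f a) < key (f b))) x acc) acc).map f by
    simpa using h []
  induction l with
  | nil => intro acc; simp
  | cons x xs ih =>
    intro acc
    simp only [List.foldl_cons]
    rw [insertBy_map_key]
    exact ih _

-- A's paired list is the index range decorated with (questions[i], answers[i], i).
theorem paired_eq (q a : List String) :
    q.zip (a.zip (PySem.List.pyRange 0 (q.length : Int) 1))
      = (PySem.List.pyRange 0 (min (q.length : Int) (a.length : Int)) 1).map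
          (fun i => (PySem.List.pyGetD q i "", (PySem.List.pyGetD a i "", i))) := by
  apply List.ext_getElem
  · simp [PySem.List.length_pyRange_one]
    omega
  · intro i h1 h2
    have hiq : i < q.length := by
      simp [PySem.List.length_pyRange_one] at h2; omega
    have hia : i < a.length := by
      simp [PySem.List.length_pyRange_one] at h2; omega
    have hrange : i < (PySem.List.pyRange 0 (q.length : Int) 1).length := by
      simp [PySem.List.length_pyRange_one]; omega
    simp [List.getElem_zip, PySem.List.getElem_pyRange_one, hiq, hia,
      List.getD_eq_getElem?_getD]

-- ===== VERDICT (by name: the statement is the Claim_ definition above) =====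
theorem sortQA_spec : Claim_equal_sortQA := by
  intro questions answers _ _
  unfold Spec_sortQA sortQA sortQA_alt
  set paired : List (String × String × Int) :=
    questions.zip (answers.zip (PySem.List.pyRange 0 (questions.length : Int) 1)) with hpaired
  have hkeys : (paired.foldl (fun d t => d.modify t.1 [] (fun g => g ++ [t]))
      (PySem.Dict.empty : PySem.Dict String (List (String × String × Int)))).keys
      = PySem.Set.ofList (paired.map (fun t => t.1)) := by
    rw [PySem.Dict.keys_foldl_modify_key paired (fun t => t.1) [] (fun _ t g => g ++ [t]) PySem.Dict.empty]
    rw [PySem.Dict.keys_empty, ← PySem.Set.update_empty]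
    rfl
  have hgetD : ∀ q, (paired.foldl (fun d t => d.modify t.1 [] (fun g => g ++ [t]))
      (PySem.Dict.empty : PySem.Dict String (List (String × String × Int)))).getD q []
      = paired.filter (fun t => t.1 == q) := by
    intro q
    have h1 : paired.foldl (fun d t => d.modify t.1 [] (fun g => g ++ [t])) PySem.Dict.empty
        = (paired.map (fun t => (t.1, t))).foldl (fun d p => d.modify p.1 [] (fun g => g ++ [p.2])) PySem.Dict.empty := by
      rw [List.foldl_map]
    rw [h1, PySem.Dict.getD_foldl_modify_append]
    rw [List.filter_map]
    simp [Function.comp_def]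
  have hmain : (PySem.List.sorted (PySem.Set.ofList (paired.map (fun t => t.1))) (fun q => q)).foldl
      (fun acc q => acc ++ paired.filter (fun t => t.1 == q)) []
      = PySem.List.sorted paired (fun t => t.1) := by
    rw [PySem.List.foldl_append_eq_flatMap, List.nil_append]
    exact stable_group_sort paired (fun t => t.1)
  have hdecor : PySem.List.sorted paired (fun t => t.1)
      = (PySem.List.sorted (PySem.List.pyRange 0 (min (questions.length : Int) (answers.length : Int)) 1)
          (fun i => PySem.List.pyGetD questions i "")).map
          (fun i => (PySem.List.pyGetD questions i "", (PySem.List.pyGetD answers i "", i))) := by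
    rw [hpaired, paired_eq]
    exact sorted_map_key
      (fun i => (PySem.List.pyGetD questions i "", (PySem.List.pyGetD answers i "", i)))
      (fun t : String × String × Int => t.1) _
  simp only [hkeys, hgetD, hmain, hdecor]
  simp [List.map_map, Function.comp_def]
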